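-- pv_equiv track=rewrite | github.com/ilambrev/freeCodeCamp-Daily-Challenges | Python_Solutions/2026_04/2026_04_30_binary_crossword.py | is_in_crossword
-- ===== SOURCE A (Python) =====
-- def is_in_crossword(char):
--     grid = [
--         [0, 1, 0, 0, 0, 0, 0, 1],
--         [0, 1, 1, 0, 1, 1, 1, 1],
--         [0, 1, 0, 0, 0, 1, 0, 0],
--         [0, 1, 1, 0, 0, 1, 0, 1],
--         [0, 1, 0, 1, 0, 0, 1, 0],
--         [0, 1, 0, 1, 0, 1, 0, 0],
--         [0, 1, 1, 0, 1, 0, 0, 0],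
--         [1, 0, 1, 0, 1, 1, 1, 0]
--     ]
--     binary_strings = []
--
--     for row in grid:
--         left_to_right = "".join(str(digit) for digit in row)
--         right_to_left = left_to_right[::-1]
--         binary_strings += [left_to_right, right_to_left]
--
--     for i in range(len(grid[0])):
--         col = []
--         for j in range(len(grid)):
--             col.append(grid[j][i])
--         up_to_down = "".join(str(digit) for digit in col)
--         down_to_up = up_to_down[::-1]
--         binary_strings += [up_to_down, down_to_up]
--
--     char_binary = format(ord(char), "b")
--     char_binary = (8 - len(char_binary)) * "0" + char_binary
--
--     return char_binary in binary_strings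
-- ===== SOURCE B (Python) =====
-- def is_in_crossword(char):
--     grid = [
--         [0, 1, 0, 0, 0, 0, 0, 1],
--         [0, 1, 1, 0, 1, 1, 1, 1],
--         [0, 1, 0, 0, 0, 1, 0, 0],
--         [0, 1, 1, 0, 0, 1, 0, 1],
--         [0, 1, 0, 1, 0, 0, 1, 0],
--         [0, 1, 0, 1, 0, 1, 0, 0],
--         [0, 1, 1, 0, 1, 0, 0, 0],
--         [1, 0, 1, 0, 1, 1, 1, 0]
--     ]
--     code = ord(char)
--     if code > 255:
--         # an 8-zero-padded binary longer than 8 bits can never equal an 8-cell line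
--         return False
--     for i in range(8):
--         rf = rb = cf = cb = 0
--         for j in range(8):
--             rf = 2 * rf + grid[i][j]
--             rb = 2 * rb + grid[i][7 - j]
--             cf = 2 * cf + grid[j][i]
--             cb = 2 * cb + grid[7 - j][i]
--         if code in (rf, rb, cf, cb):
--             return True
--     return False
-- ===== Notes on version B (the rewrite author's own statement) =====
-- stated objective: alternative
-- what changed: B never builds any strings or a membership list: it compares ord(char) numerically, packing each row/column (and its reversal) into an integer by bit arithmetic in one doubly-nested pass with early exit, after rejecting codes > 255 that A's 8-zero-padded string comparison can never match.
import Mathlib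
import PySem

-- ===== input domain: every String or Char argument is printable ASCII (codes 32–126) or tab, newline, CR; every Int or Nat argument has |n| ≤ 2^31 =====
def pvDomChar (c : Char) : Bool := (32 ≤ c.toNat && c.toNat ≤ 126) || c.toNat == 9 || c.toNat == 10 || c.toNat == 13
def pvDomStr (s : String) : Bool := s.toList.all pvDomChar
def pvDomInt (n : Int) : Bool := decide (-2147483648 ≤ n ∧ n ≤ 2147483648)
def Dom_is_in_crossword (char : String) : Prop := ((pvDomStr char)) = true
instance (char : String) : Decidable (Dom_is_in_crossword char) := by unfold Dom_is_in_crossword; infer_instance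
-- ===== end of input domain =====

-- B replaces A's build-all-32-strings-then-list-membership with pure integer
-- arithmetic: each line (row/column and reversal) is bit-packed into an Int and
-- compared to ord(char) directly, early-exiting; objective = alternative.
-- Both programs raise TypeError (ord) on non-single-character input: excluded by Pre_.

-- the fixed crossword grid (shared constant of both programs)
def pvGrid : List (List Int) :=
  [[0, 1, 0, 0, 0, 0, 0, 1],
   [0, 1, 1, 0, 1, 1, 1, 1],
   [0, 1, 0, 0, 0, 1, 0, 0],
   [0, 1, 1, 0, 0, 1, 0, 1],
   [0, 1, 0, 1, 0, 0, 1, 0],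
   [0, 1, 0, 1, 0, 1, 0, 0],
   [0, 1, 1, 0, 1, 0, 0, 0],
   [1, 0, 1, 0, 1, 1, 1, 0]]

-- ===== PORT A =====
-- "".join(str(digit) for digit in row)
def pvWord (row : List Int) : String := PySem.Str.join "" (row.map PySem.Int.toStr)

-- binary_strings after A's two accumulation loops (char-independent)
def pvBinaryStrings : List String :=
  let grid := pvGrid
  -- first loop: rows, appending each read-out and its reversal
  let bs1 : List String := grid.foldl (fun acc row =>
      let ltr := pvWord row
      let rtl := String.ofList ltr.toList.reverse   -- ltr[::-1]
      acc ++ [ltr, rtl]) []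
  -- second loop: for i in range(len(grid[0])): build the column by indexing
  (PySem.List.pyRange 0 (PySem.List.len (PySem.List.pyGetD grid 0 [])) 1).foldl (fun acc i =>
      let col : List Int := (PySem.List.pyRange 0 (PySem.List.len grid) 1).foldl
          (fun c j => c ++ [PySem.List.pyGetD (PySem.List.pyGetD grid j []) i 0]) []
      let utd := pvWord col
      let dtu := String.ofList utd.toList.reverse
      acc ++ [utd, dtu]) bs1

-- char_binary = format(code,'b'); (8 - len) * "0" + char_binary, then membership
def pvACore (code : Nat) : Bool :=
  let b := (PySem.Int.toBin (code : Int)).toList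
  let target := String.ofList (List.replicate (8 - b.length) '0' ++ b)
  pvBinaryStrings.contains target

def is_in_crossword (char : String) : Bool :=
  match char.toList with
  | [c] => pvACore c.toNat
  | _ => false  -- ord(char) raises TypeError here; excluded by Pre_

-- ===== PORT B =====
-- grid[i][j] (indices always within 0..7 here, so the default is never used)
def pvCell (i j : Int) : Int := PySem.List.pyGetD (PySem.List.pyGetD pvGrid i []) j 0

def pvBCore (code : Int) : Bool :=
  if code > 255 then false
  else
    (PySem.List.pyRange 0 8 1).any (fun i =>
      let s := (PySem.List.pyRange 0 8 1).foldl
        (fun (s : Int × Int × Int × Int) j =>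
          (2 * s.1 + pvCell i j, 2 * s.2.1 + pvCell i (7 - j),
           2 * s.2.2.1 + pvCell j i, 2 * s.2.2.2 + pvCell (7 - j) i)) (0, 0, 0, 0)
      code == s.1 || code == s.2.1 || code == s.2.2.1 || code == s.2.2.2)

def is_in_crossword_alt (char : String) : Bool :=
  if char.toList.length = 1 then
    -- code = ord(char), the single character's code
    (char.toList.head?).elim false (fun c => pvBCore (c.toNat : Int))
  else false  -- ord(char) raises TypeError here; excluded by Pre_

-- ===== PRECONDITION & SPEC =====
-- Pre_ excludes exactly the inputs where A raises: ord(char) needs a single character.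
def Pre_is_in_crossword (char : String) : Prop := char.toList.length = 1
instance (char : String) : Decidable (Pre_is_in_crossword char) := by
  unfold Pre_is_in_crossword; infer_instance
def pvWitness_is_in_crossword : String := "A"

def Spec_is_in_crossword (char : String) (out : Bool) : Prop := out = is_in_crossword_alt char
instance (char : String) (out : Bool) : Decidable (Spec_is_in_crossword char out) := by
  unfold Spec_is_in_crossword; infer_instance

-- ===== CLAIM (what is proved, stated in full; the proofs are below) =====
def Claim_equal_is_in_crossword : Prop := ∀ (char : String), Dom_is_in_crossword char → Pre_is_in_crossword char → Spec_is_in_crossword char (is_in_crossword char)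

-- ===== LEMMAS AND PROOFS =====

set_option maxHeartbeats 2000000 in
set_option maxRecDepth 10000 in
theorem pv_core_eq : ∀ n : Fin 128, pvACore n.val = pvBCore (n.val : Int) := by decide

-- ===== VERDICT (by name: the statement is the Claim_ definition above) =====
theorem is_in_crossword_spec : Claim_equal_is_in_crossword := by
  intro char hdom hpre
  obtain ⟨c, hc⟩ := List.length_eq_one_iff.mp hpre
  have hd : pvDomChar c = true := by
    have h := List.all_eq_true.mp hdom
    exact h c (by rw [hc]; exact List.mem_singleton.mpr rfl)
  have hlt : c.toNat < 128 := by
    simp only [pvDomChar, Bool.or_eq_true, Bool.and_eq_true, decide_eq_true_eq,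
      beq_iff_eq] at hd
    omega
  unfold Spec_is_in_crossword is_in_crossword is_in_crossword_alt
  rw [hc]
  simpa using pv_core_eq ⟨c.toNat, hlt⟩
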